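-- pv_equiv track=rewrite | github.com/HovorunBot/cron-parser | src/cron_parser/explain.py | _uniform_step
-- ===== SOURCE A (Python) =====
-- import itertools
--
-- def _uniform_step(values: tuple[int, ...]) -> int | None:
--     """Return the consistent delta between items or ``None`` if the step varies."""
--     if not values:
--         return None
--
--     if len(values) == 1:
--         return 1
--
--     steps = {b - a for a, b in itertools.pairwise(values)}
--     if len(steps) == 1:
--         return steps.pop()
--     return None
-- ===== SOURCE B (Python) =====
-- def _uniform_step(values: tuple[int, ...]) -> int | None:
--     """Return the consistent delta between items or ``None`` if the step varies."""
--     if not values: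
--         return None
--     n = len(values)
--     if n == 1:
--         return 1
--     total = values[-1] - values[0]
--     if total % (n - 1) != 0:
--         return None
--     d = total // (n - 1)
--     if all(v == values[0] + i * d for i, v in enumerate(values)):
--         return d
--     return None
-- ===== Notes on version B (the rewrite author's own statement) =====
-- stated objective: faster
-- what changed: Instead of collecting the set of all consecutive deltas and testing its cardinality, B derives the unique candidate step in closed form as the floor quotient of last-minus-first by the count of gaps, guards it with an exact-divisibility test, and verifies it with one positional affine check of each element against first-plus-index-times-step; only integer arithmetic, no set building or hashing.
import Mathlib
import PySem

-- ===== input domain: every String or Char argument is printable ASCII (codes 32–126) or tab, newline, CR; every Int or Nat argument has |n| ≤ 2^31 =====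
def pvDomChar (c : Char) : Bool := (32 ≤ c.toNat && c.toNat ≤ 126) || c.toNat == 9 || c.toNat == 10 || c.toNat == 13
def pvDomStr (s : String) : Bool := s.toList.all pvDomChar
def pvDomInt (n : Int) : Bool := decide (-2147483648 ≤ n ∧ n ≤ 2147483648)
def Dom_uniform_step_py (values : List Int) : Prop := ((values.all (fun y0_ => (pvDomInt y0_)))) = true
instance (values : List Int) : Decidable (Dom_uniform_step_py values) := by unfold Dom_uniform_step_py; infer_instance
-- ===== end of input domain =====

-- B replaces A's set-of-all-consecutive-deltas cardinality test by a closed-form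
-- candidate step d = (last - first) // (n - 1) (exact-divisibility guard) verified
-- with one positional affine check values[i] == values[0] + i*d (objective: alternative).

-- ===== PORT A =====
-- itertools.pairwise(values) as a list of adjacent pairs
def pvPairwise (values : List Int) : List (Int × Int) := values.zip values.tail

def uniform_step_py (values : List Int) : Option Int :=
  if values = [] then none
  else if values.length = 1 then some 1
  else
    -- {b - a for a, b in itertools.pairwise(values)}
    let steps : PySem.Set Int := PySem.Set.ofList ((pvPairwise values).map (fun p => p.2 - p.1))
    if steps.length = 1 then steps.head?   -- steps.pop() on a singleton set yields its sole element
    else none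

-- ===== PORT B =====
def uniform_step_py_alt (values : List Int) : Option Int :=
  match values with
  | [] => none
  | [_] => some 1
  | v0 :: v1 :: rest =>
    let vs := v0 :: v1 :: rest
    let n : Int := (vs.length : Int)
    let total := vs.getLast (by simp) - v0       -- values[-1] - values[0] (list nonempty here)
    if PySem.Int.mod total (n - 1) ≠ 0 then none
    else
      let d := PySem.Int.floordiv total (n - 1)
      if (PySem.List.enumerate vs 0).all (fun p => p.2 == v0 + p.1 * d) then some d
      else none

-- ===== PRECONDITION & SPEC =====
def Spec_uniform_step_py (values : List Int) (out : Option Int) : Prop := out = uniform_step_py_alt values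
instance (values : List Int) (out : Option Int) : Decidable (Spec_uniform_step_py values out) := by unfold Spec_uniform_step_py; infer_instance

-- ===== CLAIM (what is proved, stated in full; the proofs are below) =====
def Claim_equal_uniform_step_py : Prop := ∀ (values : List Int), Dom_uniform_step_py values → Spec_uniform_step_py values (uniform_step_py values)

-- ===== LEMMAS AND PROOFS =====

-- canonical characterisation: all consecutive deltas of (prev :: l) equal e
def allEq (e prev : Int) : List Int → Bool
  | [] => true
  | v :: rest => (v - prev == e) && allEq e v rest

-- A-side reduction helper (short-circuiting fold the set test collapses to)
def pvAltGo (expected : Int) (prev : Int) : List Int → Option Int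
  | [] => some expected
  | v :: rest => if v - prev ≠ expected then none else pvAltGo expected v rest

theorem pvAltGo_eq (e prev : Int) (l : List Int) :
    pvAltGo e prev l = if allEq e prev l then some e else none := by
  induction l generalizing prev with
  | nil => simp [pvAltGo, allEq]
  | cons v rest ih =>
    by_cases h : v - prev = e
    · simp [pvAltGo, allEq, h, ih]
    · simp [pvAltGo, allEq, h]

theorem pvSet_add_length_ge {s : PySem.Set Int} {x : Int} : s.length ≤ (PySem.Set.add s x).length := by
  unfold PySem.Set.add
  split <;> simp

theorem pvSet_foldl_add_length_ge (l : List Int) (s : PySem.Set Int) :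
    s.length ≤ (l.foldl PySem.Set.add s).length := by
  induction l generalizing s with
  | nil => simp
  | cons x xs ih => exact le_trans pvSet_add_length_ge (ih (PySem.Set.add s x))

-- A's set test on the deltas of (prev :: l) with first delta e computes pvAltGo
theorem pvMain (e prev : Int) (l : List Int) :
    (if (PySem.Set.ofList (e :: (pvPairwise (prev :: l)).map (fun p => p.2 - p.1))).length = 1
     then (PySem.Set.ofList (e :: (pvPairwise (prev :: l)).map (fun p => p.2 - p.1))).head?
     else none) = pvAltGo e prev l := by
  induction l generalizing e prev with
  | nil => simp [pvPairwise, PySem.Set.ofList, pvAltGo]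
  | cons v rest ih =>
    have hpw : pvPairwise (prev :: v :: rest) = (prev, v) :: pvPairwise (v :: rest) := by
      simp [pvPairwise]
    rw [hpw]
    by_cases h : v - prev = e
    · subst h
      have hdup : ∀ (x : Int) (L : List Int),
          PySem.Set.ofList (x :: x :: L) = PySem.Set.ofList (x :: L) := by
        intro x L
        simp [PySem.Set.ofList, PySem.Set.add, PySem.Set.contains]
      rw [List.map_cons, hdup]
      simp only [pvAltGo, ne_eq, not_true_eq_false, if_false]
      exact ih (v - prev) v
    · have h2 : PySem.Set.ofList (e :: (v - prev) :: (pvPairwise (v :: rest)).map (fun p => p.2 - p.1))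
          = ((pvPairwise (v :: rest)).map (fun p => p.2 - p.1)).foldl PySem.Set.add [e, v - prev] := by
        simp [PySem.Set.ofList, PySem.Set.add, h]
      have hlen : 2 ≤ (PySem.Set.ofList (e :: (v - prev) :: (pvPairwise (v :: rest)).map (fun p => p.2 - p.1))).length := by
        rw [h2]
        simpa using pvSet_foldl_add_length_ge ((pvPairwise (v :: rest)).map (fun p => p.2 - p.1)) [e, v - prev]
      simp only [List.map_cons, pvAltGo, ne_eq, h, not_false_eq_true, if_true]
      rw [if_neg (by omega)]

-- A's full value on a list with ≥ 2 elements, in canonical form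
theorem pvA_char (a b : Int) (rest : List Int) :
    uniform_step_py (a :: b :: rest) = if allEq (b - a) b rest then some (b - a) else none := by
  unfold uniform_step_py
  rw [if_neg (by simp), if_neg (by simp)]
  have hp : (pvPairwise (a :: b :: rest)).map (fun p => p.2 - p.1)
      = (b - a) :: (pvPairwise (b :: rest)).map (fun p => p.2 - p.1) := by
    simp [pvPairwise]
  simp only [hp]
  rw [pvMain (b - a) b rest, pvAltGo_eq]

-- B-side: the positional affine check, recursively
def affineB : List Int → Int → Int → Bool
  | [], _, _ => true
  | x :: xs, base, d => (x == base) && affineB xs (base + d) d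

theorem pvEnumAll (l : List Int) (k base d : Int) :
    ((PySem.List.enumerate l k).all (fun p => p.2 == base + p.1 * d)) = affineB l (base + k * d) d := by
  induction l generalizing k with
  | nil => simp [PySem.List.enumerate_nil, affineB]
  | cons x xs ih =>
    rw [PySem.List.enumerate_cons]
    simp only [List.all_cons, affineB]
    rw [ih (k + 1)]
    have : base + (k + 1) * d = base + k * d + d := by ring
    rw [this]

theorem pvAffine_allEq (l : List Int) (prev d : Int) :
    affineB l (prev + d) d = allEq d prev l := by
  induction l generalizing prev with
  | nil => simp [affineB, allEq]
  | cons v rest ih =>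
    simp only [affineB, allEq]
    by_cases h : v = prev + d
    · subst h
      have h1 : prev + d - prev = d := by ring
      rw [h1]
      simp only [beq_self_eq_true, Bool.true_and]
      exact ih (prev + d)
    · have h2 : ¬ (v - prev = d) := by omega
      have e1 : (v == prev + d) = false := by simpa using h
      have e2 : (v - prev == d) = false := by simpa using h2
      rw [e1, e2]
      simp

theorem pvLast_allEq (e prev : Int) (l : List Int) (h : allEq e prev l = true) (hne : prev :: l ≠ []) :
    (prev :: l).getLast hne = prev + l.length * e := by
  induction l generalizing prev with
  | nil => simp
  | cons v rest ih =>
    simp only [allEq, Bool.and_eq_true, beq_iff_eq] at h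
    rw [List.getLast_cons (by simp), ih v h.2 (by simp)]
    simp only [List.length_cons]
    push_cast
    have hv : v = prev + e := by omega
    subst hv
    ring

-- B's full value on a list with ≥ 2 elements, in the same canonical form
theorem pvB_char (a b : Int) (rest : List Int) :
    uniform_step_py_alt (a :: b :: rest) = if allEq (b - a) b rest then some (b - a) else none := by
  have hcheck : ∀ d : Int, ((PySem.List.enumerate (a :: b :: rest) 0).all (fun p => p.2 == a + p.1 * d))
      = ((b - a == d) && allEq d b rest) := by
    intro d
    rw [pvEnumAll (a :: b :: rest) 0 a d]
    have h0 : a + 0 * d = a := by ring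
    rw [h0]
    have hstep : affineB (a :: b :: rest) a d = ((a == a) && affineB (b :: rest) (a + d) d) := rfl
    rw [hstep, pvAffine_allEq (b :: rest) a d]
    simp [allEq]
  have hpos : (0 : Int) < (rest.length : Int) + 1 := by positivity
  simp only [uniform_step_py_alt, List.length_cons]
  have hm : (((rest.length + 1 + 1 : Nat) : Int)) - 1 = (rest.length : Int) + 1 := by
    push_cast; ring
  rw [hm]
  by_cases h : allEq (b - a) b rest = true
  · -- uniform case: last = a + (|rest|+1)·(b-a), exact division returns b - a
    rw [pvLast_allEq (b - a) a (b :: rest) (by simp [allEq, h])]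
    have htot : a + ((b :: rest).length : Int) * (b - a) - a = ((rest.length : Int) + 1) * (b - a) := by
      simp only [List.length_cons]; push_cast; ring
    rw [htot]
    have hmod : PySem.Int.mod (((rest.length : Int) + 1) * (b - a)) ((rest.length : Int) + 1) = 0 := by
      rw [PySem.Int.mod_eq_zero_iff_dvd]
      exact ⟨b - a, rfl⟩
    rw [if_neg (by rw [hmod]; simp)]
    have hdiv : PySem.Int.floordiv (((rest.length : Int) + 1) * (b - a)) ((rest.length : Int) + 1) = b - a := by
      rw [PySem.Int.floordiv_eq_iff_of_pos hpos]
      constructor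
      · nlinarith
      · nlinarith
    rw [hdiv, hcheck (b - a)]
    simp [h]
  · -- non-uniform: whatever candidate d the division yields, the affine check fails
    have hfail : ∀ d : Int, ((b - a == d) && allEq d b rest) = false := by
      intro d
      by_cases hd : d = b - a
      · subst hd
        simp [h]
      · have e1 : (b - a == d) = false := beq_eq_false_iff_ne.mpr (fun hba => hd hba.symm)
        simp [e1]
    rw [if_neg h]
    split
    · rfl
    · rw [hcheck, hfail]
      rfl

-- ===== VERDICT (by name: the statement is the Claim_ definition above) =====
theorem uniform_step_py_spec : Claim_equal_uniform_step_py := by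
  intro values _
  unfold Spec_uniform_step_py
  match values with
  | [] => rfl
  | [x] => rfl
  | a :: b :: rest => rw [pvA_char, pvB_char]
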